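-- pv_equiv track=rewrite | github.com/ZemlikSasha/lessons | lesson6/solution-1.3.py | solution
-- ===== SOURCE A (Python) =====
-- from math import sqrt
--
-- def solution(area, current_result=None):
--     if current_result is None:
--         current_result = []
--
--     side = int(sqrt(area))
--     current_result.append(side ** 2)
--
--     remainder = area - side ** 2
--     if not remainder:
--         return current_result
--
--     return solution(remainder, current_result)
-- ===== SOURCE B (Python) =====
-- from math import isqrt
--
--
-- def solution(area, current_result=None):
--     # Iterative greedy: collect the squares in a local list, then attach
--     # them to the caller-supplied list (mutating it, like A) or return them.
--     squares = []
--     while True: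
--         s = isqrt(area)
--         squares.append(s * s)
--         area -= s * s
--         if not area:
--             break
--     if current_result is None:
--         return squares
--     current_result.extend(squares)
--     return current_result
-- ===== Notes on version B (the rewrite author's own statement) =====
-- stated objective: simpler
-- what changed: Replaces A's recursion that threads the accumulator through each call with a flat iterative while-loop that collects the squares locally and attaches them to the caller's list once at the end (using exact math.isqrt instead of int(sqrt(...))).
import Mathlib
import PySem

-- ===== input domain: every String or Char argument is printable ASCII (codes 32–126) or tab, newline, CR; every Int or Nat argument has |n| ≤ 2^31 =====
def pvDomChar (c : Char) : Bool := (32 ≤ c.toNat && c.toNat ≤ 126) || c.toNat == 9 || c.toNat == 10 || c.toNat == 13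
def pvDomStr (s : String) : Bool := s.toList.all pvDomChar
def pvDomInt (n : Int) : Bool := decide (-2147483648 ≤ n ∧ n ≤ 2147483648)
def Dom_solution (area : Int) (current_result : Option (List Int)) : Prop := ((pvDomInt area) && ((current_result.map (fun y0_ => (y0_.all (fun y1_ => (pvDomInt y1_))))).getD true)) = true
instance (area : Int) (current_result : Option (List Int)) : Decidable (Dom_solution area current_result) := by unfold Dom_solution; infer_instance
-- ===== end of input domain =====

-- B replaces A's accumulator-threading recursion with a flat while-loop that collects the
-- squares locally and attaches them at the end (objective: simpler). Both A and B mutate a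
-- caller-supplied current_result list identically; the theorems are about the return value.

-- ===== PORT A =====
-- Literal port of A: recursion carrying the accumulator; int(sqrt(area)) = Int.sqrt area
-- for 0 <= area <= 2^31 (math.sqrt is correctly rounded there). The `else cur'` branch
-- is a totalizing guard only reachable when area < 0, where the Python raises ValueError.
def solutionGoA (area : Int) (cur : List Int) : List Int :=
  if area - Int.sqrt area ^ 2 = 0 then cur ++ [Int.sqrt area ^ 2]
  else if h : 0 < area - Int.sqrt area ^ 2 ∧ area - Int.sqrt area ^ 2 < area then
    solutionGoA (area - Int.sqrt area ^ 2) (cur ++ [Int.sqrt area ^ 2])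
  else cur ++ [Int.sqrt area ^ 2]
termination_by area.toNat
decreasing_by omega

def solution (area : Int) (current_result : Option (List Int)) : List Int :=
  match current_result with
  | none => solutionGoA area []
  | some l => solutionGoA area l

-- ===== PORT B =====
-- Literal port of B's while-loop: each iteration contributes one square (append = cons
-- onto the rest of the loop's output). Same totalizing guard for area < 0 (isqrt raises).
def solutionAltLoop (area : Int) : List Int :=
  if area - Int.sqrt area * Int.sqrt area = 0 then [Int.sqrt area * Int.sqrt area]
  else if h : 0 < area - Int.sqrt area * Int.sqrt area ∧
      area - Int.sqrt area * Int.sqrt area < area then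
    Int.sqrt area * Int.sqrt area :: solutionAltLoop (area - Int.sqrt area * Int.sqrt area)
  else [Int.sqrt area * Int.sqrt area]
termination_by area.toNat
decreasing_by omega

def solution_alt (area : Int) (current_result : Option (List Int)) : List Int :=
  let squares := solutionAltLoop area
  match current_result with
  | none => squares
  | some l => l ++ squares

-- ===== PRECONDITION & SPEC =====
-- Pre_ excludes area < 0, where Python's sqrt (and isqrt in B) raises ValueError.
def Pre_solution (area : Int) (current_result : Option (List Int)) : Prop := 0 ≤ area
instance (area : Int) (current_result : Option (List Int)) : Decidable (Pre_solution area current_result) := by unfold Pre_solution; infer_instance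
def pvWitness_solution : Int × Option (List Int) := (12, some [3])

def Spec_solution (area : Int) (current_result : Option (List Int)) (out : List Int) : Prop := out = solution_alt area current_result
instance (area : Int) (current_result : Option (List Int)) (out : List Int) : Decidable (Spec_solution area current_result out) := by unfold Spec_solution; infer_instance

-- ===== CLAIM (what is proved, stated in full; the proofs are below) =====
def Claim_equal_solution : Prop := ∀ (area : Int) (current_result : Option (List Int)), Dom_solution area current_result → Pre_solution area current_result → Spec_solution area current_result (solution area current_result)

-- ===== LEMMAS AND PROOFS =====
theorem solutionGoA_eq (area : Int) (cur : List Int) :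
    solutionGoA area cur = cur ++ solutionAltLoop area := by
  induction area, cur using solutionGoA.induct with
  | case1 area cur h =>
    unfold solutionGoA solutionAltLoop
    rw [if_pos h, if_pos (by simpa [pow_two] using h)]
    simp [pow_two]
  | case2 area cur h1 h2 ih =>
    unfold solutionGoA solutionAltLoop
    rw [if_neg h1, if_neg (by simpa [pow_two] using h1),
        dif_pos h2, dif_pos (by simpa [pow_two] using h2)]
    simpa [pow_two] using ih
  | case3 area cur h1 h2 =>
    unfold solutionGoA solutionAltLoop
    rw [if_neg h1, if_neg (by simpa [pow_two] using h1),
        dif_neg h2, dif_neg (by simpa [pow_two] using h2)]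
    simp [pow_two]

-- ===== VERDICT (by name: the statement is the Claim_ definition above) =====
theorem solution_spec : Claim_equal_solution := by
  intro area current_result _ _
  unfold Spec_solution solution solution_alt
  cases current_result <;> simp [solutionGoA_eq]
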